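-- pv_equiv track=rewrite | github.com/SimchaTeich/Data-Compression-Course | Lecture_01/Unique_Decipherable.py | left_quotient
-- ===== SOURCE A (Python) =====
-- def dangling_suffix(c1, c2):
--     """
--     Return the dangling suffix of c1 and c2. (order does matter)
--     """
--     if c1 == c2[:len(c1)]:
--         return c2[len(c1):]
--     else:
--         return None
--
-- def left_quotient(S, T):
--     """
--     Return the left quotient group of two groups (order does matter)
--     """
--     ret = set()
--
--     for s in S:
--         for t in T:
--             dangling = dangling_suffix(s,t)
--             if dangling:
--                 ret.add(dangling)
--
--     return list(ret)
-- ===== SOURCE B (Python) =====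
-- def left_quotient(S, T):
--     """
--     Return the left quotient group of two groups (order does matter)
--     """
--     pairs = []
--     for t in T:
--         p, suf = "", t
--         while suf:
--             pairs.append((p, suf))
--             p, suf = p + suf[0], suf[1:]
--     index = {}
--     for k, v in pairs:
--         index.setdefault(k, []).append(v)
--     out, seen = [], set()
--     for s in S:
--         for suf in index.get(s, []):
--             if suf not in seen:
--                 seen.add(suf)
--                 out.append(suf)
--     return out
-- ===== Notes on version B (the rewrite author's own statement) =====
-- stated objective: faster
-- what changed: B builds a hash index mapping every proper prefix of a T-word to its list of suffixes in one pass over T, so the inner scan of T per s disappears; deduplication is an explicit ordered seen-set instead of accumulating into a set during the scan.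
import Mathlib
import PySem

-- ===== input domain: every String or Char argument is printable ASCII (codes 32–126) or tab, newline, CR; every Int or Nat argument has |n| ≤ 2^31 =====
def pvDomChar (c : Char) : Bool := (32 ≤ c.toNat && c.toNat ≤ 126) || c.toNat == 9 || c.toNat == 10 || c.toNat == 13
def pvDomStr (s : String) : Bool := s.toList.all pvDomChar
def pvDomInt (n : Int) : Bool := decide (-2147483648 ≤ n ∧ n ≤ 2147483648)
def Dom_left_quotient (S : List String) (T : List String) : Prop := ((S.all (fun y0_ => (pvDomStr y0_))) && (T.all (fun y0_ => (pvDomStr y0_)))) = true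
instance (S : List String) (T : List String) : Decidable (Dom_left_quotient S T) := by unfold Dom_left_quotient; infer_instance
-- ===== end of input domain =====

-- B replaces A's per-s scan of T by a prefix→suffixes hash index built once over T (measured faster);
-- equal return values are proved; Python A's return order (hash order of a set) is not modelled: outputs agree as lists in first-insertion order.


-- ===== PORT A =====
def dangling_suffix (c1 : String) (c2 : String) : Option String :=
  if c1 = PySem.Str.slice c2 none (some (PySem.Str.len c1)) then
    some (PySem.Str.slice c2 (some (PySem.Str.len c1)) none)
  else
    none

def left_quotient (S : List String) (T : List String) : List String :=
  S.foldl (fun ret s =>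
    T.foldl (fun ret t =>
      match dangling_suffix s t with
      | some d => if d ≠ "" then PySem.Set.add ret d else ret
      | none => ret) ret) PySem.Set.empty

-- ===== PORT B =====
-- the while loop collecting (prefix, suffix) pairs of one word t
def pvPairsGo (acc : List (String × String)) (p : List Char) (suf : List Char) :
    List (String × String) :=
  match suf with
  | [] => acc
  | c :: rest => pvPairsGo (acc ++ [(String.ofList p, String.ofList (c :: rest))]) (p ++ [c]) rest

def left_quotient_alt (S : List String) (T : List String) : List String :=
  let pairs := T.foldl (fun acc t => pvPairsGo acc [] t.toList) []
  let index := pairs.foldl (fun d q => d.modify q.1 [] (fun x => x ++ [q.2])) PySem.Dict.empty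
  (S.foldl (fun acc s =>
      (index.getD s []).foldl (fun (acc : List String × PySem.Set String) suf =>
        if PySem.Set.contains acc.2 suf then acc
        else (acc.1 ++ [suf], PySem.Set.add acc.2 suf)) acc)
    ([], PySem.Set.empty)).1

-- ===== PRECONDITION & SPEC =====
def Spec_left_quotient (S : List String) (T : List String) (out : List String) : Prop := out = left_quotient_alt S T
instance (S : List String) (T : List String) (out : List String) : Decidable (Spec_left_quotient S T out) := by unfold Spec_left_quotient; infer_instance

-- ===== CLAIM (what is proved, stated in full; the proofs are below) =====
def Claim_equal_left_quotient : Prop := ∀ (S : List String) (T : List String), Dom_left_quotient S T → Spec_left_quotient S T (left_quotient S T)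

-- ===== LEMMAS AND PROOFS =====

-- the one candidate suffix that key s receives while scanning suffix-list `suf` of a word whose consumed prefix is p
def pvCandP (p : List Char) (suf : List Char) (s : String) : List String :=
  if p <+: s.toList ∧ s.toList.drop p.length <+: suf ∧ s.toList.length < p.length + suf.length then
    [String.ofList (suf.drop (s.toList.length - p.length))]
  else []

theorem pvPairsGo_acc (acc : List (String × String)) (p suf : List Char) :
    pvPairsGo acc p suf = acc ++ pvPairsGo [] p suf := by
  induction suf generalizing acc p with
  | nil => simp [pvPairsGo]
  | cons c rest ih =>
      rw [pvPairsGo, pvPairsGo, List.nil_append, ih,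
        ih [(String.ofList p, String.ofList (c :: rest))]]
      simp

theorem pvCandP_cons (p : List Char) (c : Char) (rest : List Char) (s : String) :
    pvCandP p (c :: rest) s =
      (if s.toList = p then [String.ofList (c :: rest)] else []) ++ pvCandP (p ++ [c]) rest s := by
  by_cases hsp : s.toList = p
  · have h2 : pvCandP (p ++ [c]) rest s = [] := by
      unfold pvCandP
      rw [if_neg]
      rintro ⟨h, -, -⟩
      have := h.length_le
      simp [hsp] at this
    simp only [hsp, h2, List.append_nil]
    unfold pvCandP
    rw [if_pos]
    · simp [hsp]
    · exact ⟨by simp [hsp], by simp [hsp], by simp only [hsp, List.length_cons]; omega⟩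
  · simp only [if_neg hsp, List.nil_append]
    unfold pvCandP
    by_cases hR : (p ++ [c]) <+: s.toList ∧ s.toList.drop (p ++ [c]).length <+: rest ∧
        s.toList.length < (p ++ [c]).length + rest.length
    · obtain ⟨h1, h2, h3⟩ := hR
      obtain ⟨w, hw⟩ := id h1
      have hlc : (p ++ [c]).length = p.length + 1 := by simp
      have hdrop1 : s.toList.drop (p ++ [c]).length = w := by
        rw [← hw]; exact List.drop_left
      have hdrop : s.toList.drop p.length = c :: w := by
        rw [← hw, List.append_assoc]
        exact List.drop_left
      have hL3 : s.toList.length < p.length + (c :: rest).length := by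
        rw [hlc] at h3; simp only [List.length_cons]; omega
      have hL2 : s.toList.drop p.length <+: c :: rest := by
        rw [hdrop, List.cons_prefix_cons]
        exact ⟨rfl, hdrop1 ▸ h2⟩
      have hL1 : p <+: s.toList := ⟨[c] ++ w, by simpa using hw⟩
      rw [if_pos ⟨hL1, hL2, hL3⟩, if_pos ⟨h1, h2, h3⟩]
      have hlen : p.length + 1 ≤ s.toList.length := by
        have := h1.length_le
        rw [hlc] at this; exact this
      have harith : s.toList.length - p.length = (s.toList.length - (p ++ [c]).length) + 1 := by
        rw [hlc]; omega
      rw [harith, List.drop_succ_cons]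
    · rw [if_neg hR, if_neg]
      rintro ⟨h1, h2, h3⟩
      obtain ⟨u, hu⟩ := h1
      have hdropu : s.toList.drop p.length = u := by rw [← hu]; exact List.drop_left
      have hune : u ≠ [] := by
        rintro rfl
        exact hsp (by simp [← hu])
      obtain ⟨u0, u', rfl⟩ := List.exists_cons_of_ne_nil hune
      rw [hdropu] at h2
      rw [List.cons_prefix_cons] at h2
      obtain ⟨hu0, h2'⟩ := h2
      subst hu0
      apply hR
      refine ⟨⟨u', by rw [← hu]; simp⟩, ?_, ?_⟩
      · have hd : s.toList.drop (p ++ [u0]).length = u' := by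
          rw [← hu, show p ++ u0 :: u' = (p ++ [u0]) ++ u' by simp]
          exact List.drop_left
        rw [hd]
        exact h2'
      · simp only [List.length_append, List.length_cons, List.length_nil] at h3 ⊢
        omega

theorem pvPairs_filter (p suf : List Char) (s : String) :
    ((pvPairsGo [] p suf).filter (fun q => q.1 == s)).map (·.2) = pvCandP p suf s := by
  induction suf generalizing p with
  | nil =>
      simp only [pvPairsGo, List.filter_nil, List.map_nil, pvCandP]
      rw [if_neg]
      rintro ⟨h1, -, h3⟩
      have := h1.length_le
      simp only [List.length_nil, Nat.add_zero] at h3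
      omega
  | cons c rest ih =>
      rw [pvPairsGo, pvPairsGo_acc, pvCandP_cons]
      simp only [List.filter_append, List.map_append, ih]
      congr 1
      by_cases h : s.toList = p
      · have hps : String.ofList p = s := by
          apply String.toList_inj.mp; simp [h]
        simp [List.filter, hps, h]
      · have hps : ¬ (String.ofList p == s) = true := by
          simp only [beq_iff_eq]
          intro hc
          exact h (by rw [← hc]; simp)
        simp [List.filter, hps, h]

-- A's inner-loop body is exactly "fold Set.add over pvCandP [] t.toList s"
theorem pvA_step (s t : String) (ret : PySem.Set String) :
    (match dangling_suffix s t with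
      | some d => if d ≠ "" then PySem.Set.add ret d else ret
      | none => ret) = (pvCandP [] t.toList s).foldl PySem.Set.add ret := by
  have hlen : PySem.Str.len s = (s.toList.length : Int) := by
    simp [PySem.Str.len_eq]
  have hslice_to : (PySem.Str.slice t none (some (PySem.Str.len s))).toList =
      t.toList.take s.toList.length := by
    rw [hlen]
    simp only [PySem.Str.toList_slice, PySem.Chars.slice_eq_listSlice]
    rw [PySem.List.slice_to t.toList (Int.natCast_nonneg _)]
    simp
  have hcond : (s = PySem.Str.slice t none (some (PySem.Str.len s))) ↔
      s.toList = t.toList.take s.toList.length := by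
    rw [← String.toList_inj, hslice_to]
  have hval : PySem.Str.slice t (some (PySem.Str.len s)) none =
      String.ofList (t.toList.drop s.toList.length) := by
    apply String.toList_inj.mp
    rw [hlen]
    simp only [PySem.Str.toList_slice, PySem.Chars.slice_eq_listSlice]
    rw [PySem.List.slice_from t.toList (Int.natCast_nonneg _)]
    simp
  unfold dangling_suffix
  by_cases hc : s.toList = t.toList.take s.toList.length
  · rw [if_pos (hcond.mpr hc), hval]
    show (if String.ofList (t.toList.drop s.toList.length) ≠ "" then
        PySem.Set.add ret (String.ofList (t.toList.drop s.toList.length)) else ret) = _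
    have hpre : s.toList <+: t.toList := List.prefix_iff_eq_take.mpr hc
    by_cases hlt : s.toList.length < t.toList.length
    · have hne : String.ofList (t.toList.drop s.toList.length) ≠ "" := by
        intro hcontra
        have h0 : t.toList.drop s.toList.length = [] := by
          have := congrArg String.toList hcontra
          simpa using this
        rw [List.drop_eq_nil_iff] at h0
        omega
      rw [if_pos hne]
      unfold pvCandP
      rw [if_pos ⟨List.nil_prefix, by simpa using hpre, by simpa using hlt⟩]
      simp only [List.length_nil, Nat.sub_zero]
      rfl
    · have hVempty : String.ofList (t.toList.drop s.toList.length) = "" := by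
        have h0 : t.toList.drop s.toList.length = [] := by
          rw [List.drop_eq_nil_iff]
          exact Nat.le_of_not_lt hlt
        rw [h0]
      rw [if_neg (not_not_intro hVempty)]
      unfold pvCandP
      rw [if_neg (by rintro ⟨-, -, hbad⟩
                     simp only [List.length_nil, Nat.zero_add] at hbad
                     omega)]
      rfl
  · rw [if_neg (fun hcontra => hc (hcond.mp hcontra))]
    unfold pvCandP
    rw [if_neg (by rintro ⟨-, hpre, -⟩
                   simp only [List.length_nil, List.drop_zero] at hpre
                   exact hc (List.prefix_iff_eq_take.mp hpre))]
    rfl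

-- B's (out, seen) loop is the Set.add fold, both components
theorem pvPair_fold (L : List String) (acc : List String × PySem.Set String) (h : acc.1 = acc.2) :
    L.foldl (fun (acc : List String × PySem.Set String) suf =>
        if PySem.Set.contains acc.2 suf then acc
        else (acc.1 ++ [suf], PySem.Set.add acc.2 suf)) acc =
      (L.foldl PySem.Set.add acc.2, L.foldl PySem.Set.add acc.2) := by
  induction L generalizing acc with
  | nil =>
      obtain ⟨a, b⟩ := acc
      change a = b at h
      subst h
      rfl
  | cons x L ih =>
      simp only [List.foldl]
      by_cases hc : PySem.Set.contains acc.2 x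
      · rw [if_pos hc]
        have hadd : PySem.Set.add acc.2 x = acc.2 := by
          have hm : x ∈ acc.2 := by simpa using hc
          simp [PySem.Set.add, hm]
        rw [hadd, ih acc h]
      · rw [if_neg hc]
        have hadd : PySem.Set.add acc.2 x = acc.2 ++ [x] := by
          have hm : x ∉ acc.2 := by simpa using hc
          simp [PySem.Set.add, hm]
        rw [hadd, ih (acc.1 ++ [x], acc.2 ++ [x]) (by simp [h])]

-- the index built by B maps s to the concatenated per-word candidate lists
theorem pvIndex_getD (T : List String) (s : String) :
    ((T.foldl (fun acc t => pvPairsGo acc [] t.toList) []).foldl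
        (fun (d : PySem.Dict String (List String)) q => d.modify q.1 [] (fun x => x ++ [q.2]))
        PySem.Dict.empty).getD s [] =
      T.flatMap (fun t => pvCandP [] t.toList s) := by
  have hpairs : T.foldl (fun acc t => pvPairsGo acc [] t.toList) [] =
      T.flatMap (fun t => pvPairsGo [] [] t.toList) := by
    have hfun : (fun (acc : List (String × String)) (t : String) => pvPairsGo acc [] t.toList) =
        (fun acc t => acc ++ pvPairsGo [] [] t.toList) := by
      funext acc t
      exact pvPairsGo_acc acc [] t.toList
    rw [hfun]
    simpa using PySem.List.foldl_append_eq_flatMap (fun t => pvPairsGo [] [] t.toList) T []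
  rw [hpairs, PySem.Dict.getD_foldl_modify_append, PySem.Dict.getD_empty, List.nil_append,
    List.filter_flatMap, List.map_flatMap]
  congr 1
  funext t
  exact pvPairs_filter [] t.toList s

-- B's outer loop over S, run on an (out, seen) pair with out = seen, is the plain Set.add fold
theorem pvOuter_fold (f : String → List String) (S : List String) :
    ∀ acc : List String × PySem.Set String, acc.1 = acc.2 →
    S.foldl (fun acc s =>
        (f s).foldl (fun (acc : List String × PySem.Set String) suf =>
          if PySem.Set.contains acc.2 suf then acc
          else (acc.1 ++ [suf], PySem.Set.add acc.2 suf)) acc) acc =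
      (S.foldl (fun r s => (f s).foldl PySem.Set.add r) acc.2,
       S.foldl (fun r s => (f s).foldl PySem.Set.add r) acc.2) := by
  induction S with
  | nil =>
      intro acc h
      obtain ⟨a, b⟩ := acc
      change a = b at h
      subst h
      rfl
  | cons s S ih =>
      intro acc h
      simp only [List.foldl]
      rw [pvPair_fold (f s) acc h]
      exact ih _ rfl

-- ===== VERDICT (by name: the statement is the Claim_ definition above) =====
theorem left_quotient_spec : Claim_equal_left_quotient := by
  intro S T _
  show left_quotient S T = left_quotient_alt S T
  unfold left_quotient left_quotient_alt
  simp only [pvIndex_getD]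
  have hA : ∀ (s : String) (ret : PySem.Set String),
      T.foldl (fun ret t =>
        match dangling_suffix s t with
        | some d => if d ≠ "" then PySem.Set.add ret d else ret
        | none => ret) ret =
      (T.flatMap (fun t => pvCandP [] t.toList s)).foldl PySem.Set.add ret := by
    intro s ret
    rw [List.foldl_flatMap]
    have hf : (fun (ret : PySem.Set String) t =>
        match dangling_suffix s t with
        | some d => if d ≠ "" then PySem.Set.add ret d else ret
        | none => ret) =
        (fun (ret : PySem.Set String) t => (pvCandP [] t.toList s).foldl PySem.Set.add ret) := by
      funext r t
      exact pvA_step s t r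
    rw [hf]
  simp only [hA]
  rw [pvOuter_fold (fun s => T.flatMap (fun t => pvCandP [] t.toList s)) S
    ([], PySem.Set.empty) rfl]
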